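-- pv_equiv track=rewrite | github.com/vtn-hz/teoinf-tps | utils/errores/multiparidad.py | trackErrorMultiparidad
-- ===== SOURCE A (Python) =====
-- def trackErrorMultiparidad( matrix: list, par = True ) -> list:
--
--     errHorizontal = []
--     errVertical = []
--
--     # Verificar paridad horizontal
--     for i in range(len(matrix)):
--         bitAmount = 0 if par else 1
--         for j in range(len(matrix[i])):
--             bitAmount += matrix[i][j]
--         if (bitAmount % 2) != 0:
--             errHorizontal.append(i)
--
--     # Verificar paridad vertical
--     for j in range(len(matrix[0])):
--         bitAmount = 0 if par else 1
--         for i in range(len(matrix)):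
--             bitAmount += matrix[i][j]
--         if (bitAmount % 2) != 0:
--             errVertical.append(j)
--
--     return errHorizontal, errVertical
-- ===== SOURCE B (Python) =====
-- def trackErrorMultiparidad(matrix: list, par=True) -> list:
--     # Single pass over the rows: horizontal checks and column accumulation fused.
--     base = 0 if par else 1
--     col_acc = [base] * len(matrix[0])
--     errHorizontal = []
--     for i, row in enumerate(matrix):
--         if (base + sum(row)) % 2:
--             errHorizontal.append(i)
--         col_acc = [c + row[j] for j, c in enumerate(col_acc)]
--     errVertical = [j for j, c in enumerate(col_acc) if c % 2]
--     return errHorizontal, errVertical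
-- ===== Notes on version B (the rewrite author's own statement) =====
-- stated objective: alternative
-- what changed: A scans the matrix twice (row-major for horizontal parity, then column-major with an inner scan per column); B makes one row-major pass that fuses the horizontal check with a per-column accumulator and derives the vertical errors from the accumulator afterwards.
import Mathlib
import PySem

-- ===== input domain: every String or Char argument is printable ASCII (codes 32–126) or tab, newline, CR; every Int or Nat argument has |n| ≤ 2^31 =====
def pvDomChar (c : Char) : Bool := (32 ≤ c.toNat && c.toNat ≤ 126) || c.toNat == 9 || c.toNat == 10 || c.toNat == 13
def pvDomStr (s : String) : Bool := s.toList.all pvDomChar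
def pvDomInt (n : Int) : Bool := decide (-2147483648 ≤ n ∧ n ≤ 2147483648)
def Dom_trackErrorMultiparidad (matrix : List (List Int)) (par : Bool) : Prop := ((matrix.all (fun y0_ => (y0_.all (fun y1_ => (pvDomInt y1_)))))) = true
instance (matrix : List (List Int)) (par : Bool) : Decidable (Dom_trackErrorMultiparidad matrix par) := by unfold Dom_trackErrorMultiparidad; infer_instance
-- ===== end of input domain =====

-- B fuses A's two matrix scans into one row-major pass with a per-column accumulator; same cost, different decomposition.

-- ===== PORT A =====
def trackErrorMultiparidad (matrix : List (List Int)) (par : Bool) : List Int × List Int :=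
  let errHorizontal := (PySem.List.pyRange 0 matrix.length 1).foldl (fun acc i =>
    let bitAmount := (PySem.List.pyRange 0 (PySem.List.pyGetD matrix i ([] : List Int)).length 1).foldl
      (fun b j => b + PySem.List.pyGetD (PySem.List.pyGetD matrix i ([] : List Int)) j 0)
      (if par then 0 else 1)
    if PySem.Int.mod bitAmount 2 ≠ 0 then acc ++ [i] else acc) []
  let errVertical := (PySem.List.pyRange 0 (PySem.List.pyGetD matrix 0 ([] : List Int)).length 1).foldl (fun acc j =>
    let bitAmount := (PySem.List.pyRange 0 matrix.length 1).foldl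
      (fun b i => b + PySem.List.pyGetD (PySem.List.pyGetD matrix i ([] : List Int)) j 0)
      (if par then 0 else 1)
    if PySem.Int.mod bitAmount 2 ≠ 0 then acc ++ [j] else acc) []
  (errHorizontal, errVertical)

-- ===== PORT B =====
-- col_acc = [c + row[j] for j, c in enumerate(col_acc)]; row[j] is pyGetD (in range on every Pre_ input)
def trackErrorMultiparidad_alt (matrix : List (List Int)) (par : Bool) : List Int × List Int :=
  let base : Int := if par then 0 else 1
  let ncols := (PySem.List.pyGetD matrix 0 ([] : List Int)).length
  let st := (PySem.List.enumerate matrix).foldl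
    (fun (st : List Int × List Int) p =>
      ((PySem.List.enumerate st.1).map (fun q => q.2 + PySem.List.pyGetD p.2 q.1 0),
       if PySem.Int.mod (base + p.2.sum) 2 ≠ 0 then st.2 ++ [p.1] else st.2))
    (List.replicate ncols base, [])
  (st.2, ((PySem.List.enumerate st.1).filter (fun q => PySem.Int.mod q.2 2 ≠ 0)).map (fun q => q.1))

-- ===== PRECONDITION & SPEC =====
-- Pre_ excludes exactly where A raises IndexError (and B raises it too): the empty matrix
-- (len(matrix[0])), and matrices with a row shorter than the first row (matrix[i][j] / row[j]).
def Pre_trackErrorMultiparidad (matrix : List (List Int)) (par : Bool) : Prop :=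
  matrix ≠ [] ∧ ∀ row ∈ matrix, matrix.headI.length ≤ row.length
instance (matrix : List (List Int)) (par : Bool) : Decidable (Pre_trackErrorMultiparidad matrix par) := by unfold Pre_trackErrorMultiparidad; infer_instance
def pvWitness_trackErrorMultiparidad : List (List Int) × Bool := ([[1, 0], [0, 1], [1, 1]], true)

def Spec_trackErrorMultiparidad (matrix : List (List Int)) (par : Bool) (out : List Int × List Int) : Prop := out = trackErrorMultiparidad_alt matrix par
instance (matrix : List (List Int)) (par : Bool) (out : List Int × List Int) : Decidable (Spec_trackErrorMultiparidad matrix par out) := by unfold Spec_trackErrorMultiparidad; infer_instance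

-- ===== CLAIM (what is proved, stated in full; the proofs are below) =====
def Claim_equal_trackErrorMultiparidad : Prop := ∀ (matrix : List (List Int)) (par : Bool), Dom_trackErrorMultiparidad matrix par → Pre_trackErrorMultiparidad matrix par → Spec_trackErrorMultiparidad matrix par (trackErrorMultiparidad matrix par)

-- ===== LEMMAS AND PROOFS =====

theorem bFoldSplit (base : Int) (rows : List (List Int)) (s : Int) (ca eh : List Int) :
    (PySem.List.enumerate rows s).foldl
      (fun (st : List Int × List Int) p =>
        ((PySem.List.enumerate st.1).map (fun q => q.2 + PySem.List.pyGetD p.2 q.1 0),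
         if PySem.Int.mod (base + p.2.sum) 2 ≠ 0 then st.2 ++ [p.1] else st.2)) (ca, eh)
    = (rows.foldl (fun c r => (PySem.List.enumerate c).map (fun q => q.2 + PySem.List.pyGetD r q.1 0)) ca,
       eh ++ ((PySem.List.enumerate rows s).filter
         (fun p => decide (PySem.Int.mod (base + p.2.sum) 2 ≠ 0))).map (fun p => p.1)) := by
  induction rows generalizing s ca eh with
  | nil => simp [PySem.List.enumerate_nil]
  | cons r t ih =>
      rw [PySem.List.enumerate_cons]
      simp only [List.foldl_cons, List.filter_cons, ih]
      split_ifs <;> simp_all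

-- [c + r[s+k] for k, c in enumerate(col_acc)] = zipWith (+) col_acc (r.drop s)
theorem rowAdd (r : List Int) (c : List Int) (s : Nat) (h : s + c.length ≤ r.length) :
    (PySem.List.enumerate c (s : Int)).map (fun q => q.2 + PySem.List.pyGetD r q.1 0)
      = List.zipWith (· + ·) c (r.drop s) := by
  induction c generalizing s with
  | nil => simp [PySem.List.enumerate_nil]
  | cons x t ih =>
      rw [PySem.List.enumerate_cons, List.map_cons]
      have hs : s < r.length := by simp at h; omega
      rw [List.drop_eq_getElem_cons hs, List.zipWith_cons_cons]
      have : ((s : Int) + 1) = ((s + 1 : Nat) : Int) := by push_cast; ring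
      rw [this, ih (s + 1) (by simp at h ⊢; omega)]
      congr 1
      rw [PySem.List.pyGetD_natCast, List.getD_eq_getElem r 0 hs]

theorem colEq (rows : List (List Int)) (c : List Int)
    (h : ∀ r ∈ rows, c.length ≤ r.length) :
    rows.foldl (fun c r => (PySem.List.enumerate c).map (fun q => q.2 + PySem.List.pyGetD r q.1 0)) c
      = rows.foldl (fun c r => List.zipWith (· + ·) c r) c := by
  induction rows generalizing c with
  | nil => rfl
  | cons r t ih =>
      have h0 := h r (by simp)
      have hr := rowAdd r c 0 (by omega)
      simp only [Nat.cast_zero, List.drop_zero] at hr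
      rw [List.foldl_cons, List.foldl_cons, hr]
      exact ih _ (by intro x hx; have := h x (by simp [hx]); simp; omega)

theorem colFoldLen (rows : List (List Int)) (ca : List Int)
    (h : ∀ r ∈ rows, ca.length ≤ r.length) :
    (rows.foldl (fun c r => List.zipWith (· + ·) c r) ca).length = ca.length := by
  induction rows generalizing ca with
  | nil => rfl
  | cons r t ih =>
      have h0 := h r (by simp)
      rw [List.foldl_cons, ih]
      · simp; omega
      · intro x hx
        have := h x (by simp [hx])
        simp; omega

theorem colFoldGet (rows : List (List Int)) (ca : List Int) (j : Nat)
    (h : ∀ r ∈ rows, ca.length ≤ r.length) (hj : j < ca.length) :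
    (rows.foldl (fun c r => List.zipWith (· + ·) c r) ca).getD j 0
      = rows.foldl (fun b r => b + r.getD j 0) (ca.getD j 0) := by
  induction rows generalizing ca with
  | nil => rfl
  | cons r t ih =>
      have h0 := h r (by simp)
      rw [List.foldl_cons, List.foldl_cons, ih]
      · congr 1
        simp [hj, List.length_zipWith, hj.trans_le h0]
      · intro x hx
        have := h x (by simp [hx])
        simp; omega
      · simp; omega

theorem main (matrix : List (List Int)) (par : Bool)
    (hne : matrix ≠ []) (hall : ∀ row ∈ matrix, matrix.headI.length ≤ row.length) :
    trackErrorMultiparidad matrix par = trackErrorMultiparidad_alt matrix par := by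
  have hrow0 : PySem.List.pyGetD matrix 0 ([] : List Int) = matrix.headI := by
    obtain ⟨a, t, rfl⟩ := List.exists_cons_of_ne_nil hne
    simp [pysem]
  unfold trackErrorMultiparidad trackErrorMultiparidad_alt
  simp only [hrow0]
  rw [bFoldSplit]
  have hlen : ∀ r ∈ matrix, (List.replicate matrix.headI.length ((if par = true then (0:Int) else 1))).length ≤ r.length := by
    intro r hr; simpa using hall r hr
  rw [colEq matrix _ hlen]
  refine Prod.ext ?_ ?_
  · -- horizontal component
    dsimp only
    rw [PySem.List.foldl_append_ite_eq_filter, PySem.List.enumerate_eq_map_pyRange matrix ([] : List Int),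
      List.filter_map, List.map_map]
    simp only [List.nil_append]
    rw [show ((fun (p : Int × List Int) => p.1) ∘ fun j => (j, PySem.List.pyGetD matrix j ([] : List Int))) = id from rfl,
      List.map_id]
    apply List.filter_congr
    intro i _hi
    rw [PySem.List.foldl_pyRange_zero_pyGetD' (PySem.List.pyGetD matrix i ([] : List Int)) 0
      (fun b x => b + x) (if par = true then 0 else 1)]
    rw [PySem.List.foldl_add (PySem.List.pyGetD matrix i ([] : List Int)) (fun x => x) (if par = true then 0 else 1)]
    simp [Function.comp]
  · -- vertical component
    dsimp only
    have hF := colFoldLen matrix (List.replicate matrix.headI.length ((if par = true then (0:Int) else 1))) hlen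
    rw [PySem.List.foldl_append_ite_eq_filter, PySem.List.enumerate_eq_map_pyRange _ (0 : Int),
      List.filter_map, List.map_map]
    simp only [List.nil_append, PySem.List.len_eq, hF, List.length_replicate]
    rw [show ((fun (q : Int × Int) => q.1) ∘ fun j => (j, PySem.List.pyGetD (List.foldl (fun c r => List.zipWith (fun x1 x2 => x1 + x2) c r) (List.replicate matrix.headI.length (if par = true then 0 else 1)) matrix) j 0)) = id from rfl,
      List.map_id]
    apply List.filter_congr
    intro j hj
    have hj' := (PySem.List.mem_pyRange_one.mp (by simpa using hj))
    obtain ⟨k, rfl⟩ : ∃ k : Nat, j = (k : Int) := ⟨j.toNat, by omega⟩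
    have hk : k < matrix.headI.length := by exact_mod_cast hj'.2
    simp only [Function.comp_apply]
    rw [PySem.List.foldl_pyRange_zero_pyGetD' matrix ([] : List Int)
      (fun b r => b + PySem.List.pyGetD r (k : Int) 0) (if par = true then 0 else 1)]
    rw [PySem.List.pyGetD_natCast]
    rw [colFoldGet matrix _ k hlen (by simpa using hk)]
    rw [PySem.List.foldl_congr_mem matrix _ (fun b r => b + r.getD k 0) _
      (by intro acc r _hr; rw [PySem.List.pyGetD_natCast])]
    congr 2
    simp [hk]

-- ===== VERDICT (by name: the statement is the Claim_ definition above) =====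
theorem trackErrorMultiparidad_spec : Claim_equal_trackErrorMultiparidad := by
  intro matrix par _ hpre
  unfold Spec_trackErrorMultiparidad
  exact main matrix par hpre.1 hpre.2
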